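-- pv_equiv track=rewrite | github.com/parkjisu6239/2021_APS | Programmers/Level_3/3_보석쇼핑.py | solution
-- ===== SOURCE A (Python) =====
-- def solution(gems):
--     start = 1
--     end = 1
--     start_idx = 0
--     end_idx = len(gems)-1
--     while start or end:
--         if gems[end_idx] in gems[:end_idx]:
--             end_idx -= 1
--         else:
--             end = 0
--
--         if end == 0:
--             if gems[start_idx] in gems[start_idx+1:]:
--                 start_idx += 1
--             else:
--                 start = 0
--
--
--     return [start_idx+1, end_idx+1]
-- ===== SOURCE B (Python) =====
-- def solution(gems):
--     first = {}
--     last = {}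
--     for i, g in enumerate(gems):
--         if g not in first:
--             first[g] = i
--         last[g] = i
--     return [min(last.values()) + 1, max(first.values()) + 1]
-- ===== Notes on version B (the rewrite author's own statement) =====
-- stated objective: faster
-- what changed: Replaces A's quadratic trimming loop (repeated 'in'-membership scans over list slices while shrinking both ends) with a single pass that builds first- and last-occurrence dicts and returns min(last.values())+1, max(first.values())+1.
import Mathlib
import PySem

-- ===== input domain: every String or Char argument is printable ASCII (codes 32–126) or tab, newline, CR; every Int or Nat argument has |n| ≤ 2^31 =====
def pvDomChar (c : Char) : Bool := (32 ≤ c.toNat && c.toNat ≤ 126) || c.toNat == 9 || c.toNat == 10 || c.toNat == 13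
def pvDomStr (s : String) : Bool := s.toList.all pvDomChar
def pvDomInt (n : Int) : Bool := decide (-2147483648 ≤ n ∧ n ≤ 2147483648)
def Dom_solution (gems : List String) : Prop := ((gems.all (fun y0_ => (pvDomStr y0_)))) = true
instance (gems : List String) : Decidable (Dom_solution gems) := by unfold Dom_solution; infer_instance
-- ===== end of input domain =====

-- B replaces A's quadratic two-ended trimming loop by one pass over first/last-occurrence
-- dicts (objective: faster).

-- ===== PORT A =====
-- A's while loop, ported with a fuel argument for totality: the loop performs at most
-- 2*len(gems)+2 iterations on any nonempty input (end_idx only decreases while ≥ 0,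
-- start_idx only increases while < len), so the fuel is never exhausted under Pre_.
-- '(PySem.List.pyGet? gems i).getD ""' : the 'getD ""' default is unreachable under
-- Pre_ (Python raises IndexError only for gems = [], which Pre_ excludes).
def solLoop (gems : List String) : Nat → Int → Int → Int → Int → Int × Int
  | 0, _, _, si, ei => (si, ei)
  | fuel+1, s, e, si, ei =>
    if s ≠ 0 ∨ e ≠ 0 then
      -- if gems[end_idx] in gems[:end_idx]: end_idx -= 1 else: end = 0
      let p1 : Int × Int :=
        if (PySem.List.slice gems none (some ei)).contains ((PySem.List.pyGet? gems ei).getD "")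
        then (e, ei - 1) else (0, ei)
      -- if end == 0: (if gems[start_idx] in gems[start_idx+1:]: start_idx += 1 else: start = 0)
      let p2 : Int × Int :=
        if p1.1 = 0 then
          if (PySem.List.slice gems (some (si + 1)) none).contains ((PySem.List.pyGet? gems si).getD "")
          then (s, si + 1) else (0, si)
        else (s, si)
      solLoop gems fuel p2.1 p1.1 p2.2 p1.2
    else (si, ei)

def solution (gems : List String) : List Int :=
  let r := solLoop gems (2 * gems.length + 2) 1 1 0 ((gems.length : Int) - 1)
  [r.1 + 1, r.2 + 1]

-- ===== PORT B =====
-- One pass over enumerate(gems) building the first- and last-occurrence dicts;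
-- the '.getD 0' default is unreachable under Pre_ (Python's min/max raise ValueError
-- only when the dicts are empty, i.e. gems = [], which Pre_ excludes).
def solution_alt (gems : List String) : List Int :=
  let fl := (PySem.List.enumerate gems 0).foldl
    (fun (fl : PySem.Dict String Int × PySem.Dict String Int) ig =>
      (if fl.1.contains ig.2 then fl.1 else fl.1.insert ig.2 ig.1,
       fl.2.insert ig.2 ig.1))
    (PySem.Dict.empty, PySem.Dict.empty)
  [(PySem.List.min? fl.2.values (fun x => x)).getD 0 + 1,
   (PySem.List.max? fl.1.values (fun x => x)).getD 0 + 1]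

-- ===== PRECONDITION & SPEC =====
-- Pre_ excludes only the empty list, on which A raises IndexError (gems[-1] of []).
def Pre_solution (gems : List String) : Prop := gems ≠ []
instance (gems : List String) : Decidable (Pre_solution gems) := by unfold Pre_solution; infer_instance
def pvWitness_solution : List String := (["a", "b", "a"])

def Spec_solution (gems : List String) (out : List Int) : Prop := out = solution_alt gems
instance (gems : List String) (out : List Int) : Decidable (Spec_solution gems out) := by unfold Spec_solution; infer_instance

-- ===== CLAIM (what is proved, stated in full; the proofs are below) =====
def Claim_equal_solution : Prop := ∀ (gems : List String), Dom_solution gems → Pre_solution gems → Spec_solution gems (solution gems)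

-- ===== LEMMAS AND PROOFS =====

-- "gems[i] occurs earlier" / "gems[i] occurs later" (i a valid index)
def firstq (gems : List String) (i : Nat) : Bool := (gems.take i).contains (gems.getD i "")
def dupq (gems : List String) (i : Nat) : Bool := (gems.drop (i+1)).contains (gems.getD i "")

-- the index at which A's end-trimming from e stops (greatest j ≤ e with ¬ firstq j)
def fd (gems : List String) : Nat → Nat
  | 0 => 0
  | e+1 => if firstq gems (e+1) then fd gems e else e+1

-- the index at which A's start-trimming from si stops (least j ≥ si with ¬ dupq j)
def gu (gems : List String) : Nat → Nat → Nat
  | 0, si => si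
  | k+1, si => if dupq gems si then gu gems k (si+1) else si

theorem firstq_zero (gems : List String) : firstq gems 0 = false := by
  simp [firstq]

theorem dupq_last (gems : List String) (h : gems ≠ []) :
    dupq gems (gems.length - 1) = false := by
  have h1 : gems.length - 1 + 1 = gems.length := by
    cases gems with
    | nil => exact absurd rfl h
    | cons a t => simp
  simp [dupq, h1]

theorem fd_le (gems : List String) (e : Nat) : fd gems e ≤ e := by
  induction e with
  | zero => simp [fd]
  | succ e ih =>
    by_cases h : firstq gems (e+1) = true
    · simp [fd, h]; omega
    · simp [fd, h]

theorem fd_not_firstq (gems : List String) (e : Nat) : firstq gems (fd gems e) = false := by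
  induction e with
  | zero => simpa [fd] using firstq_zero gems
  | succ e ih =>
    by_cases h : firstq gems (e+1) = true
    · simpa [fd, h] using ih
    · simp only [fd, h, if_false]
      simpa using h

theorem fd_ge (gems : List String) (e j : Nat) (hj : j ≤ e) (hq : firstq gems j = false) :
    j ≤ fd gems e := by
  induction e with
  | zero => omega
  | succ e ih =>
    by_cases h : firstq gems (e+1) = true
    · have : j ≠ e + 1 := by rintro rfl; rw [hq] at h; exact absurd h (by simp)
      simp only [fd, h, if_pos rfl, if_true]
      exact ih (by omega)
    · simp [fd, h]; omega

theorem gu_le_stop (gems : List String) :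
    ∀ (k si j : Nat), si ≤ j → j ≤ si + k → dupq gems j = false → gu gems (k+1) si ≤ j := by
  intro k
  induction k with
  | zero =>
    intro si j h1 h2 h3
    have : j = si := by omega
    subst this
    simp [gu, h3]
  | succ k ih =>
    intro si j h1 h2 h3
    by_cases hd : dupq gems si = true
    · have hne : j ≠ si := by rintro rfl; rw [h3] at hd; exact absurd hd (by simp)
      have : gu gems (k+1+1) si = gu gems (k+1) (si+1) := by simp [gu, hd]
      rw [this]
      exact ih (si+1) j (by omega) (by omega) h3
    · simp [gu, hd]; omega

theorem gu_not_dupq (gems : List String) :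
    ∀ (k si : Nat), dupq gems (si + k) = false → dupq gems (gu gems (k+1) si) = false := by
  intro k
  induction k with
  | zero =>
    intro si h
    simp only [Nat.add_zero] at h
    simp [gu, h]
  | succ k ih =>
    intro si h
    by_cases hd : dupq gems si = true
    · have : gu gems (k+1+1) si = gu gems (k+1) (si+1) := by simp [gu, hd]
      rw [this]
      exact ih (si+1) (by simpa [Nat.add_comm, Nat.add_assoc, Nat.add_left_comm] using h)
    · simp [gu, hd]

-- bridges from the PySem slice/index tests in the loop to firstq/dupq
theorem bridgeE (gems : List String) (e : Nat) (h : e < gems.length) :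
    ((PySem.List.slice gems none (some (e : Int))).contains
      ((PySem.List.pyGet? gems (e : Int)).getD "")) = firstq gems e := by
  rw [PySem.List.slice_to_natCast, PySem.List.pyGet?_natCast]
  simp [firstq, List.getD_eq_getElem?_getD, List.getElem?_eq_getElem h]

theorem bridgeS (gems : List String) (s : Nat) (h : s < gems.length) :
    ((PySem.List.slice gems (some ((s : Int) + 1)) none).contains
      ((PySem.List.pyGet? gems (s : Int)).getD "")) = dupq gems s := by
  have hc : ((s : Int) + 1) = ((s + 1 : Nat) : Int) := by push_cast; ring
  rw [hc, PySem.List.slice_from_natCast, PySem.List.pyGet?_natCast]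
  simp [dupq, List.getD_eq_getElem?_getD, List.getElem?_eq_getElem h]

theorem end_desc (gems : List String) :
    ∀ (e : Nat), e < gems.length → ∀ (f : Nat) (si : Int),
      solLoop gems ((e - fd gems e) + f) 1 1 si (e : Int)
        = solLoop gems f 1 1 si ((fd gems e : Nat) : Int) := by
  intro e
  induction e with
  | zero => intro _ f si; simp [fd]
  | succ e ih =>
    intro he f si
    by_cases h : firstq gems (e+1) = true
    · have hle : fd gems e ≤ e := fd_le gems e
      have hfd : fd gems (e+1) = fd gems e := by simp [fd, h]
      have hfuel : (e + 1 - fd gems (e+1)) + f = (((e - fd gems e) + f)) + 1 := by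
        rw [hfd]; omega
      rw [hfuel, hfd]
      have hbr := bridgeE gems (e+1) he
      rw [h] at hbr
      rw [solLoop]
      simp only [hbr]
      norm_num
      exact ih (by omega) f si
    · have hfd : fd gems (e+1) = e+1 := by simp [fd, h]
      rw [hfd]
      simp

theorem start_asc (gems : List String) (ei : Int)
    (hei : ((PySem.List.slice gems none (some ei)).contains
             ((PySem.List.pyGet? gems ei).getD "")) = false) :
    ∀ (k si : Nat) (e : Int) (f : Nat), si + k < gems.length → dupq gems (si + k) = false →
      solLoop gems (k + 2 + f) 1 e (si : Int) ei = (((gu gems (k+1) si : Nat) : Int), ei) := by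
  intro k
  induction k with
  | zero =>
    intro si e f hlt hstop
    simp only [Nat.add_zero] at hlt hstop
    have hbr := bridgeS gems si hlt
    rw [hstop] at hbr
    rw [show (0 : Nat) + 2 + f = (1 + f) + 1 by omega, solLoop]
    simp only [hei, hbr]
    norm_num
    rw [show 1 + f = f + 1 by omega, solLoop]
    norm_num
    simp [gu, hstop]
  | succ k ih =>
    intro si e f hlt hstop
    have hsilt : si < gems.length := by omega
    have hbr := bridgeS gems si hsilt
    rw [show (k + 1) + 2 + f = (k + 2 + f) + 1 by omega, solLoop]
    simp only [hei]
    by_cases hd : dupq gems si = true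
    · rw [hd] at hbr
      simp only [hbr]
      norm_num
      have hc : ((si : Int) + 1) = ((si + 1 : Nat) : Int) := by push_cast; ring
      rw [hc]
      rw [ih (si + 1) 0 f (by omega) (by
        have h9 : si + 1 + k = si + (k + 1) := by omega
        rw [h9]; exact hstop)]
      have hgu : gu gems (k+1+1) si = gu gems (k+1) (si+1) := by simp [gu, hd]
      rw [hgu]
    · rw [eq_false_of_ne_true hd] at hbr
      simp only [hbr]
      norm_num
      rw [show k + 2 + f = (k + 1 + f) + 1 by omega, solLoop]
      norm_num
      simp [gu, hd]

-- A's loop computes (gu n 0, fd (n-1))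
theorem solution_eq (gems : List String) (h : gems ≠ []) :
    solution gems = [((gu gems gems.length 0 : Nat) : Int) + 1,
                     ((fd gems (gems.length - 1) : Nat) : Int) + 1] := by
  have hn : 1 ≤ gems.length := by
    cases gems with
    | nil => exact absurd rfl h
    | cons a t => simp
  set n := gems.length with hn'
  have hE : fd gems (n-1) ≤ n - 1 := fd_le gems (n-1)
  have hcast : (n : Int) - 1 = ((n - 1 : Nat) : Int) := by omega
  have hfuel : 2 * n + 2 = ((n - 1) - fd gems (n-1)) + ((n - 1) + 2 + (fd gems (n-1) + 2)) := by
    omega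
  unfold solution
  rw [hcast, hfuel, end_desc gems (n-1) (by omega)]
  have hei : ((PySem.List.slice gems none (some ((fd gems (n-1) : Nat) : Int))).contains
      ((PySem.List.pyGet? gems ((fd gems (n-1) : Nat) : Int)).getD "")) = false := by
    rw [bridgeE gems (fd gems (n-1)) (by omega)]
    exact fd_not_firstq gems (n-1)
  have := start_asc gems ((fd gems (n-1) : Nat) : Int) hei (n-1) 0 1 (fd gems (n-1) + 2)
    (by omega) (by simpa using dupq_last gems h)
  rw [show ((0 : Nat) : Int) = (0 : Int) by simp] at this
  rw [this]
  have : (n - 1) + 1 = n := by omega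
  rw [this]

-- ===== B-side =====
def Ffirst (gems : List String) : PySem.Dict String Int :=
  (PySem.List.enumerate gems 0).foldl
    (fun d ig => if d.contains ig.2 then d else d.insert ig.2 ig.1) PySem.Dict.empty

def Flast (gems : List String) : PySem.Dict String Int :=
  (PySem.List.enumerate gems 0).foldl
    (fun d ig => d.insert ig.2 ig.1) PySem.Dict.empty

theorem alt_eq (gems : List String) :
    solution_alt gems
      = [(PySem.List.min? (Flast gems).values (fun x => x)).getD 0 + 1,
         (PySem.List.max? (Ffirst gems).values (fun x => x)).getD 0 + 1] := by
  unfold solution_alt Ffirst Flast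
  rw [PySem.List.foldl_prod_mk
    (f := fun d (ig : Int × String) => if PySem.Dict.contains d ig.2 then d else d.insert ig.2 ig.1)
    (g := fun d (ig : Int × String) => PySem.Dict.insert d ig.2 ig.1)]

theorem Flast_append (xs : List String) (x : String) :
    Flast (xs ++ [x]) = (Flast xs).insert x (xs.length : Int) := by
  unfold Flast
  rw [PySem.List.enumerate_append, List.foldl_append]
  simp [PySem.List.enumerate_cons, PySem.List.enumerate_nil]

theorem Ffirst_append (xs : List String) (x : String) :
    Ffirst (xs ++ [x])
      = if (Ffirst xs).contains x then Ffirst xs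
        else (Ffirst xs).insert x (xs.length : Int) := by
  unfold Ffirst
  rw [PySem.List.enumerate_append, List.foldl_append]
  simp [PySem.List.enumerate_cons, PySem.List.enumerate_nil]

theorem Flast_keys (xs : List String) : (Flast xs).keys = PySem.Set.ofList xs := by
  unfold Flast
  rw [PySem.Dict.keys_foldl_insert_key (PySem.List.enumerate xs 0) (fun ig => ig.2)
    (fun _ ig => ig.1) PySem.Dict.empty]
  rw [PySem.List.map_snd_enumerate, PySem.Dict.keys_empty, PySem.Set.ofList_eq_foldl]
  rfl

theorem Ffirst_keys (xs : List String) : (Ffirst xs).keys = PySem.Set.ofList xs := by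
  induction xs using List.reverseRecOn with
  | nil => simp [Ffirst, PySem.List.enumerate_nil, PySem.Set.ofList]
  | append_singleton xs x ih =>
    rw [Ffirst_append]
    have hofl : PySem.Set.ofList (xs ++ [x]) = PySem.Set.add (PySem.Set.ofList xs) x := by
      simp [PySem.Set.ofList, List.foldl_append]
    by_cases hm : (Ffirst xs).contains x = true
    · rw [if_pos hm, ih, hofl]
      have hx : x ∈ PySem.Set.ofList xs := by
        rw [PySem.Dict.contains_iff_mem_keys, ih] at hm; exact hm
      simp [PySem.Set.add, PySem.Set.contains, hx]
    · rw [if_neg hm, hofl]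
      have hx : x ∉ PySem.Set.ofList xs := by
        intro hmem
        exact hm (by rw [PySem.Dict.contains_iff_mem_keys, ih]; exact hmem)
      rw [PySem.Dict.keys_insert_of_not_contains _ _ (by
        simp only [Bool.not_eq_true] at hm; exact hm)]
      rw [ih]
      simp [PySem.Set.add, PySem.Set.contains, hx]

theorem Flast_nodup (xs : List String) : (Flast xs).keys.Nodup := by
  rw [Flast_keys]; exact PySem.Set.nodup_ofList xs

theorem Ffirst_nodup (xs : List String) : (Ffirst xs).keys.Nodup := by
  rw [Ffirst_keys]; exact PySem.Set.nodup_ofList xs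

-- append behaviour of the index predicates
theorem getD_append_lt (xs : List String) (x : String) (i : Nat) (h : i < xs.length) :
    (xs ++ [x]).getD i "" = xs.getD i "" := by
  simp [List.getD, List.getElem?_append_left h]

theorem getD_append_self (xs : List String) (x : String) :
    (xs ++ [x]).getD xs.length "" = x := by
  rw [List.getD_eq_getElem?_getD, List.getElem?_append_right (le_refl xs.length)]
  simp

theorem dupq_append_lt (xs : List String) (x : String) (i : Nat) (h : i < xs.length) :
    dupq (xs ++ [x]) i = false ↔ (dupq xs i = false ∧ xs.getD i "" ≠ x) := by
  unfold dupq
  rw [getD_append_lt xs x i h,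
    List.drop_append_of_le_length (show i + 1 ≤ xs.length by omega)]
  simp

theorem dupq_append_self (xs : List String) (x : String) :
    dupq (xs ++ [x]) xs.length = false := by
  simp [dupq]

theorem firstq_append_lt (xs : List String) (x : String) (i : Nat) (h : i < xs.length) :
    firstq (xs ++ [x]) i = firstq xs i := by
  unfold firstq
  rw [getD_append_lt xs x i h, List.take_append_of_le_length (show i ≤ xs.length by omega)]

theorem firstq_append_self (xs : List String) (x : String) :
    firstq (xs ++ [x]) xs.length = xs.contains x := by
  unfold firstq
  rw [getD_append_self, List.take_left]

-- getD facts about the last-occurrence dict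
theorem Flast_getD_lastocc (xs : List String) :
    ∀ (i : Nat), i < xs.length → dupq xs i = false →
      (Flast xs).getD (xs.getD i "") 0 = (i : Int) := by
  induction xs using List.reverseRecOn with
  | nil => intro i h; simp at h
  | append_singleton xs x ih =>
    intro i hi hd
    rw [Flast_append]
    by_cases hcase : i < xs.length
    · obtain ⟨hd1, hd2⟩ := (dupq_append_lt xs x i hcase).mp hd
      rw [getD_append_lt xs x i hcase,
        PySem.Dict.getD_insert_of_ne _ _ _ hd2]
      exact ih i hcase hd1
    · have hieq : i = xs.length := by
        simp only [List.length_append, List.length_cons, List.length_nil] at hi; omega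
      subst hieq
      rw [getD_append_self, PySem.Dict.getD_insert_self]

theorem Flast_getD_mem (xs : List String) :
    ∀ (g : String), g ∈ xs → ∃ i : Nat, i < xs.length ∧ (Flast xs).getD g 0 = (i : Int)
      ∧ xs.getD i "" = g ∧ dupq xs i = false := by
  induction xs using List.reverseRecOn with
  | nil => intro g h; simp at h
  | append_singleton xs x ih =>
    intro g hg
    rw [Flast_append]
    by_cases hgx : g = x
    · subst hgx
      refine ⟨xs.length, by simp, ?_, ?_, ?_⟩
      · rw [PySem.Dict.getD_insert_self]
      · exact getD_append_self xs g
      · exact dupq_append_self xs g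
    · have hgm : g ∈ xs := by
        rcases List.mem_append.mp hg with h | h
        · exact h
        · simp at h; exact absurd h hgx
      obtain ⟨i, hi, hget, hgi, hdi⟩ := ih g hgm
      refine ⟨i, by simp; omega, ?_, ?_, ?_⟩
      · rw [PySem.Dict.getD_insert_of_ne _ _ _ hgx]; exact hget
      · rw [getD_append_lt xs x i hi]; exact hgi
      · exact (dupq_append_lt xs x i hi).mpr ⟨hdi, by rw [hgi]; exact hgx⟩

-- getD facts about the first-occurrence dict
theorem Ffirst_contains (xs : List String) (x : String) :
    (Ffirst xs).contains x = true ↔ x ∈ xs := by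
  rw [PySem.Dict.contains_iff_mem_keys, Ffirst_keys]
  exact PySem.Set.mem_ofList xs x

theorem Ffirst_getD_firstocc (xs : List String) :
    ∀ (i : Nat), i < xs.length → firstq xs i = false →
      (Ffirst xs).getD (xs.getD i "") 0 = (i : Int) := by
  induction xs using List.reverseRecOn with
  | nil => intro i h; simp at h
  | append_singleton xs x ih =>
    intro i hi hq
    rw [Ffirst_append]
    by_cases hcase : i < xs.length
    · rw [getD_append_lt xs x i hcase]
      rw [firstq_append_lt xs x i hcase] at hq
      by_cases hc : (Ffirst xs).contains x = true
      · rw [if_pos hc]; exact ih i hcase hq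
      · rw [if_neg hc]
        have hne : xs.getD i "" ≠ x := by
          intro heq
          apply hc
          rw [Ffirst_contains]
          rw [← heq]
          have : xs.getD i "" = xs[i] := List.getD_eq_getElem xs "" hcase
          rw [this]; exact List.getElem_mem hcase
        rw [PySem.Dict.getD_insert_of_ne _ _ _ hne]
        exact ih i hcase hq
    · have hieq : i = xs.length := by
        simp only [List.length_append, List.length_cons, List.length_nil] at hi; omega
      subst hieq
      rw [firstq_append_self] at hq
      have hc : (Ffirst xs).contains x = false := by
        rw [Bool.eq_false_iff]
        intro hcc
        rw [Ffirst_contains] at hcc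
        rw [← List.contains_iff_mem] at hcc
        rw [hq] at hcc
        exact Bool.false_ne_true hcc
      rw [if_neg (by simp [hc]), getD_append_self, PySem.Dict.getD_insert_self]

theorem Ffirst_getD_mem (xs : List String) :
    ∀ (g : String), g ∈ xs → ∃ i : Nat, i < xs.length ∧ (Ffirst xs).getD g 0 = (i : Int)
      ∧ xs.getD i "" = g ∧ firstq xs i = false := by
  induction xs using List.reverseRecOn with
  | nil => intro g h; simp at h
  | append_singleton xs x ih =>
    intro g hg
    rw [Ffirst_append]
    by_cases hgm : g ∈ xs
    · obtain ⟨i, hi, hget, hgi, hqi⟩ := ih g hgm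
      have hbase : ∀ d : PySem.Dict String Int, d.getD g 0 = (Ffirst xs).getD g 0 →
          ∃ i : Nat, i < (xs ++ [x]).length ∧ d.getD g 0 = (i : Int)
            ∧ (xs ++ [x]).getD i "" = g ∧ firstq (xs ++ [x]) i = false := by
        intro d hd
        refine ⟨i, by simp; omega, by rw [hd]; exact hget, ?_, ?_⟩
        · rw [getD_append_lt xs x i hi]; exact hgi
        · rw [firstq_append_lt xs x i hi]; exact hqi
      by_cases hc : (Ffirst xs).contains x = true
      · rw [if_pos hc]; exact hbase _ rfl
      · rw [if_neg hc]
        apply hbase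
        have hne : g ≠ x := by
          intro heq; subst heq
          exact hc ((Ffirst_contains xs g).mpr hgm)
        exact PySem.Dict.getD_insert_of_ne _ _ _ hne
    · have hgx : g = x := by
        rcases List.mem_append.mp hg with h | h
        · exact absurd h hgm
        · simpa using h
      subst hgx
      have hc : (Ffirst xs).contains g = false := by
        rw [Bool.eq_false_iff]
        intro hcc
        exact hgm ((Ffirst_contains xs g).mp hcc)
      rw [if_neg (by simp [hc])]
      refine ⟨xs.length, by simp, ?_, getD_append_self xs g, ?_⟩
      · rw [PySem.Dict.getD_insert_self]
      · rw [firstq_append_self]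
        rw [← Bool.not_eq_true, List.contains_iff_mem]
        exact hgm

-- the extrema of the dict values coincide with A's stopping indices
theorem value_min (gems : List String) (h : gems ≠ []) :
    (PySem.List.min? (Flast gems).values (fun x => x)).getD 0
      = ((gu gems gems.length 0 : Nat) : Int) := by
  have hn : 1 ≤ gems.length := List.length_pos_iff.mpr h
  set n := gems.length with hn'
  have hvals : (Flast gems).values
      = (PySem.Set.ofList gems).map (fun k => (Flast gems).getD k 0) := by
    rw [PySem.Dict.values_eq_map_keys (Flast gems) (Flast_nodup gems) 0, Flast_keys]
  have hlast : dupq gems (0 + (n - 1)) = false := by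
    simpa using dupq_last gems h
  have hgudef : gu gems n 0 = gu gems ((n-1)+1) 0 := by
    have : (n-1)+1 = n := by omega
    rw [this]
  have hglt : gu gems n 0 ≤ n - 1 := by
    rw [hgudef]
    exact gu_le_stop gems (n-1) 0 (n-1) (by omega) (by omega) (by simpa using hlast)
  have hgd : dupq gems (gu gems n 0) = false := by
    rw [hgudef]
    exact gu_not_dupq gems (n-1) 0 hlast
  have hgmem : ((gu gems n 0 : Nat) : Int) ∈ (Flast gems).values := by
    rw [hvals]
    refine List.mem_map.mpr ⟨gems.getD (gu gems n 0) "", ?_, ?_⟩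
    · rw [PySem.Set.mem_ofList]
      rw [List.getD_eq_getElem gems "" (by omega)]
      exact List.getElem_mem (by omega)
    · exact Flast_getD_lastocc gems (gu gems n 0) (by omega) hgd
  obtain ⟨m, hm⟩ : ∃ m, PySem.List.min? (Flast gems).values (fun x => x) = some m := by
    cases hmm : PySem.List.min? (Flast gems).values (fun x => x) with
    | none =>
      exfalso
      rw [PySem.List.min?_eq_none_iff] at hmm
      rw [hmm] at hgmem
      simp at hgmem
    | some m => exact ⟨m, rfl⟩
  rw [hm]
  have h1 : m ≤ ((gu gems n 0 : Nat) : Int) := PySem.List.min?_isMin hm _ hgmem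
  have h2 : ((gu gems n 0 : Nat) : Int) ≤ m := by
    have hmem := PySem.List.min?_mem hm
    rw [hvals] at hmem
    obtain ⟨k, hk, hkd⟩ := List.mem_map.mp hmem
    rw [PySem.Set.mem_ofList] at hk
    obtain ⟨i, hi, hget, hgi, hdi⟩ := Flast_getD_mem gems k hk
    rw [← hkd, hget]
    have : gu gems n 0 ≤ i := by
      rw [hgudef]
      exact gu_le_stop gems (n-1) 0 i (by omega) (by omega) hdi
    omega
  have : m = ((gu gems n 0 : Nat) : Int) := le_antisymm h1 h2
  rw [this]
  rfl

theorem value_max (gems : List String) (h : gems ≠ []) :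
    (PySem.List.max? (Ffirst gems).values (fun x => x)).getD 0
      = ((fd gems (gems.length - 1) : Nat) : Int) := by
  have hn : 1 ≤ gems.length := List.length_pos_iff.mpr h
  set n := gems.length with hn'
  have hvals : (Ffirst gems).values
      = (PySem.Set.ofList gems).map (fun k => (Ffirst gems).getD k 0) := by
    rw [PySem.Dict.values_eq_map_keys (Ffirst gems) (Ffirst_nodup gems) 0, Ffirst_keys]
  have hE : fd gems (n-1) ≤ n - 1 := fd_le gems (n-1)
  have hEq : firstq gems (fd gems (n-1)) = false := fd_not_firstq gems (n-1)
  have hEmem : ((fd gems (n-1) : Nat) : Int) ∈ (Ffirst gems).values := by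
    rw [hvals]
    refine List.mem_map.mpr ⟨gems.getD (fd gems (n-1)) "", ?_, ?_⟩
    · rw [PySem.Set.mem_ofList]
      rw [List.getD_eq_getElem gems "" (by omega)]
      exact List.getElem_mem (by omega)
    · exact Ffirst_getD_firstocc gems (fd gems (n-1)) (by omega) hEq
  obtain ⟨m, hm⟩ : ∃ m, PySem.List.max? (Ffirst gems).values (fun x => x) = some m := by
    cases hmm : PySem.List.max? (Ffirst gems).values (fun x => x) with
    | none =>
      exfalso
      rw [PySem.List.max?_eq_none_iff] at hmm
      rw [hmm] at hEmem
      simp at hEmem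
    | some m => exact ⟨m, rfl⟩
  rw [hm]
  have h1 : ((fd gems (n-1) : Nat) : Int) ≤ m := PySem.List.max?_isMax hm _ hEmem
  have h2 : m ≤ ((fd gems (n-1) : Nat) : Int) := by
    have hmem := PySem.List.max?_mem hm
    rw [hvals] at hmem
    obtain ⟨k, hk, hkd⟩ := List.mem_map.mp hmem
    rw [PySem.Set.mem_ofList] at hk
    obtain ⟨i, hi, hget, hgi, hqi⟩ := Ffirst_getD_mem gems k hk
    rw [← hkd, hget]
    have : i ≤ fd gems (n-1) := fd_ge gems (n-1) i (by omega) hqi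
    omega
  have : m = ((fd gems (n-1) : Nat) : Int) := le_antisymm h2 h1
  rw [this]
  rfl

-- ===== VERDICT (by name: the statement is the Claim_ definition above) =====
theorem solution_spec : Claim_equal_solution := by
  intro gems _ hpre
  unfold Spec_solution
  rw [solution_eq gems hpre, alt_eq gems, value_min gems hpre, value_max gems hpre]
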